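-- pv_equiv track=rewrite | github.com/offbeatport/obp-dagster | src/burningdemand/defs/utils.py | strip_hn_html
-- ===== SOURCE A (Python) =====
-- def strip_hn_html(text: str) -> str:
--     # Very simple HTML stripping for HN "text" field
--     if not text:
--         return ""
--     s = text.replace("<p>", "\n").replace("<br>", "\n").replace(
--         "<br/>", "\n").replace("<br />", "\n")
--     # Remove tags
--     out = []
--     in_tag = False
--     for ch in s:
--         if ch == "<":
--             in_tag = True
--             continue
--         if ch == ">":
--             in_tag = False
--             continue
--         if not in_tag:
--             out.append(ch)
--     s = "".join(out)
--     # Decode common entities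
--     return (
--         s.replace("&quot;", '"')
--         .replace("&#x27;", "'")
--         .replace("&amp;", "&")
--         .replace("&lt;", "<")
--         .replace("&gt;", ">")
--         .strip()
--     )
-- ===== SOURCE B (Python) =====
-- def strip_hn_html(text: str) -> str:
--     # Very simple HTML stripping for HN "text" field.
--     # Index-based scanner: jump between tag delimiters with str.find instead of
--     # walking the string char-by-char with an in_tag flag.
--     if not text:
--         return ""
--     s = (text.replace("<p>", "\n").replace("<br>", "\n")
--              .replace("<br/>", "\n").replace("<br />", "\n"))
--     pieces = []
--     i = 0
--     while True:
--         start = s.find("<", i)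
--         if start == -1:
--             # no more tags; keep the rest (stray '>' are dropped, as tag noise)
--             pieces.append(s[i:].replace(">", ""))
--             break
--         pieces.append(s[i:start].replace(">", ""))
--         j = s.find(">", start)
--         if j == -1:
--             break  # unclosed tag: discard the remainder
--         i = j + 1
--     s = "".join(pieces)
--     return (
--         s.replace("&quot;", '"')
--         .replace("&#x27;", "'")
--         .replace("&amp;", "&")
--         .replace("&lt;", "<")
--         .replace("&gt;", ">")
--         .strip()
--     )
-- ===== Notes on version B (the rewrite author's own statement) =====
-- stated objective: faster
-- what changed: The per-character loop with an in_tag flag is replaced by an index-based scanner that uses str.find to jump from tag delimiter to tag delimiter and copies the inter-tag text in whole slices (stray '>' dropped per chunk, unclosed tag discards the rest, matching A).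
import Mathlib
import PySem

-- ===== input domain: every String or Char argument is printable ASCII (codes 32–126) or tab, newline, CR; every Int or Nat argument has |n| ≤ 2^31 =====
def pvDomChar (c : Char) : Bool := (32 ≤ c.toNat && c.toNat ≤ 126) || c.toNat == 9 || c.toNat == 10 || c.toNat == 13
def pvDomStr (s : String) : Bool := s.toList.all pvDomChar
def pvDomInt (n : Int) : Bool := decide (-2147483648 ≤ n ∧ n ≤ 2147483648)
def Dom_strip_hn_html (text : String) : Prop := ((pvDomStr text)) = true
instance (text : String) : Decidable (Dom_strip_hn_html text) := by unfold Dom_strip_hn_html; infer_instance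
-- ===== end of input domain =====

-- B replaces A's per-character in_tag-flag loop by a scanner that jumps from one
-- tag delimiter to the next and copies the text between tags in whole chunks
-- (measured faster by a constant factor in Python; same return value).

-- ===== PORT A =====
-- the body of A's `for ch in s` loop: state = (out, in_tag)
def hnStepA (st : List Char × Bool) (ch : Char) : List Char × Bool :=
  if ch = '<' then (st.1, true)
  else if ch = '>' then (st.1, false)
  else if st.2 = false then (st.1 ++ [ch], st.2)
  else st

def strip_hn_html (text : String) : String :=
  if text = "" then ""
  else
    let s := PySem.Str.replace (PySem.Str.replace (PySem.Str.replace
      (PySem.Str.replace text "<p>" "\n") "<br>" "\n") "<br/>" "\n") "<br />" "\n"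
    let s2 := String.ofList (s.toList.foldl hnStepA ([], false)).1
    PySem.Str.strip (PySem.Str.replace (PySem.Str.replace (PySem.Str.replace
      (PySem.Str.replace (PySem.Str.replace s2 "&quot;" "\"") "&#x27;" "'")
      "&amp;" "&") "&lt;" "<") "&gt;" ">")

-- ===== PORT B =====
-- Source B's scanner, on the remaining suffix of the string: the chunk before the
-- next '<' (with stray '>' removed — `.replace(">", "")` on a single character
-- is exactly `filter`), then skip to just past the next '>'; an unclosed tag
-- discards the remainder.
def hnScanB (cs : List Char) : List Char :=
  let chunk := (cs.takeWhile (· ≠ '<')).filter (· ≠ '>')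
  match h : cs.dropWhile (· ≠ '<') with
  | [] => chunk
  | _ :: r =>
    match h2 : r.dropWhile (· ≠ '>') with
    | [] => chunk
    | _ :: r2 => chunk ++ hnScanB r2
termination_by cs.length
decreasing_by
  have hr : (List.dropWhile (· ≠ '<') cs).length ≤ cs.length := List.length_dropWhile_le _ _
  have hr2 : (List.dropWhile (· ≠ '>') r).length ≤ r.length := List.length_dropWhile_le _ _
  rw [h] at hr; rw [h2] at hr2
  simp only [List.length_cons] at hr hr2
  omega

def strip_hn_html_alt (text : String) : String :=
  if text = "" then ""
  else
    let s := PySem.Str.replace (PySem.Str.replace (PySem.Str.replace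
      (PySem.Str.replace text "<p>" "\n") "<br>" "\n") "<br/>" "\n") "<br />" "\n"
    let s2 := String.ofList (hnScanB s.toList)
    PySem.Str.strip (PySem.Str.replace (PySem.Str.replace (PySem.Str.replace
      (PySem.Str.replace (PySem.Str.replace s2 "&quot;" "\"") "&#x27;" "'")
      "&amp;" "&") "&lt;" "<") "&gt;" ">")

-- ===== PRECONDITION & SPEC =====
def Spec_strip_hn_html (text : String) (out : String) : Prop := out = strip_hn_html_alt text
instance (text : String) (out : String) : Decidable (Spec_strip_hn_html text out) := by unfold Spec_strip_hn_html; infer_instance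

-- ===== CLAIM (what is proved, stated in full; the proofs are below) =====
def Claim_equal_strip_hn_html : Prop := ∀ (text : String), Dom_strip_hn_html text → Spec_strip_hn_html text (strip_hn_html text)

-- ===== LEMMAS AND PROOFS =====

-- hnScanB, unfolded once, with the common chunk prefix pulled out of the match
theorem hnScanB_eq (cs : List Char) : hnScanB cs =
    (cs.takeWhile (· ≠ '<')).filter (· ≠ '>') ++
    (match (cs.dropWhile (· ≠ '<')) with
     | [] => []
     | _ :: r =>
       match r.dropWhile (· ≠ '>') with
       | [] => []
       | _ :: r2 => hnScanB r2) := by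
  rw [hnScanB.eq_def]
  cases h : cs.dropWhile (· ≠ '<') with
  | nil => simp
  | cons a r =>
    split <;> rename_i h2
    · exact absurd h2 (List.cons_ne_nil a r)
    · injection h2 with hh1 hh2
      subst hh1; subst hh2
      split <;> rename_i h3 <;> simp only [h3] <;> simp

-- what A's loop produces from the in_tag = true state
def hnTagRest (cs : List Char) : List Char :=
  match cs.dropWhile (· ≠ '>') with
  | [] => []
  | _ :: r => hnScanB r


-- same, with the tail match named hnTagRest
theorem hnScanB_eq' (cs : List Char) : hnScanB cs =
    (cs.takeWhile (· ≠ '<')).filter (· ≠ '>') ++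
    (match (cs.dropWhile (· ≠ '<')) with
     | [] => []
     | _ :: r => hnTagRest r) := by
  rw [hnScanB_eq]
  cases h : cs.dropWhile (· ≠ '<') <;> simp [hnTagRest]

theorem hnScanB_nil : hnScanB [] = [] := by rw [hnScanB_eq']; simp

theorem hnScanB_cons_ne (c : Char) (cs : List Char) (hc : ¬ c = '<') :
    hnScanB (c :: cs) = (if c = '>' then [] else [c]) ++ hnScanB cs := by
  rw [hnScanB_eq' (c :: cs), hnScanB_eq' cs,
    List.takeWhile_cons_of_pos (by simp [hc]),
    List.dropWhile_cons_of_pos (by simp [hc]), List.filter_cons]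
  by_cases hg : c = '>' <;> simp [hg]

theorem hnScanB_cons_lt (cs : List Char) : hnScanB ('<' :: cs) = hnTagRest cs := by
  rw [hnScanB_eq' ('<' :: cs), List.takeWhile_cons_of_neg (by simp),
    List.dropWhile_cons_of_neg (by simp)]
  simp

theorem hnTagRest_nil : hnTagRest [] = [] := by simp [hnTagRest]

theorem hnTagRest_cons_gt (cs : List Char) : hnTagRest ('>' :: cs) = hnScanB cs := by
  rw [hnTagRest, List.dropWhile_cons_of_neg (by simp)]

theorem hnTagRest_cons_ne (c : Char) (cs : List Char) (hg : ¬ c = '>') :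
    hnTagRest (c :: cs) = hnTagRest cs := by
  rw [hnTagRest, List.dropWhile_cons_of_pos (by simp [hg]), hnTagRest]

-- A's character loop as a structural recursion (proof helper, not a port)
def hnRecA : List Char → Bool → List Char
  | [], _ => []
  | c :: cs, b =>
    if c = '<' then hnRecA cs true
    else if c = '>' then hnRecA cs false
    else if b = false then c :: hnRecA cs b
    else hnRecA cs b

theorem hnRecA_eq (cs : List Char) :
    hnRecA cs false = hnScanB cs ∧ hnRecA cs true = hnTagRest cs := by
  induction cs with
  | nil => simp [hnRecA, hnScanB_nil, hnTagRest_nil]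
  | cons c cs ih =>
    obtain ⟨ih1, ih2⟩ := ih
    by_cases hc : c = '<'
    · subst hc
      refine ⟨?_, ?_⟩
      · simp [hnRecA, ih2, hnScanB_cons_lt]
      · rw [hnTagRest_cons_ne _ _ (by decide)]
        simp [hnRecA, ih2]
    · by_cases hg : c = '>'
      · subst hg
        refine ⟨?_, ?_⟩
        · rw [hnScanB_cons_ne _ _ hc]
          simp [hnRecA, hc, ih1]
        · rw [hnTagRest_cons_gt]
          simp [hnRecA, hc, ih1]
      · refine ⟨?_, ?_⟩
        · rw [hnScanB_cons_ne _ _ hc]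
          simp [hnRecA, hc, hg, ih1]
        · rw [hnTagRest_cons_ne _ _ hg]
          simp [hnRecA, hc, hg, ih2]

-- A's foldl produces its out-list appended to hnRecA of the rest
theorem hnFoldA_eq (cs : List Char) (out : List Char) (b : Bool) :
    (cs.foldl hnStepA (out, b)).1 = out ++ hnRecA cs b := by
  induction cs generalizing out b with
  | nil => simp [hnRecA]
  | cons c cs ih =>
    simp only [List.foldl_cons, hnStepA, hnRecA]
    split_ifs <;> simp [ih]

-- ===== VERDICT (by name: the statement is the Claim_ definition above) =====
theorem strip_hn_html_spec : Claim_equal_strip_hn_html := by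
  intro text _
  unfold Spec_strip_hn_html strip_hn_html strip_hn_html_alt
  by_cases h : text = ""
  · simp [h]
  · simp only [h, if_false]
    rw [hnFoldA_eq, (hnRecA_eq _).1, List.nil_append]
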